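-- pv_equiv track=rewrite | github.com/Mikko-Ihasalo/PrimenumberCode | Alkulukukoodi.py | B_count_Primes_nums
-- ===== SOURCE A (Python) =====
-- def B_count_Primes_nums(n):
--
--     ctr = 0
--
--     for num in range(11,n,6):
--         if num <= 1:
--             continue
--         for i in range(2, num):
--             if (num % i) == 0:
--                 break
--         else:
--             ctr += 1
--
--     return ctr
-- ===== SOURCE B (Python) =====
-- def B_count_Primes_nums(n):
--     def is_prime(num):
--         i = 2
--         while i * i <= num:
--             if num % i == 0:
--                 return False
--             i += 1
--         return True
--
--     return sum(1 for num in range(11, n, 6) if is_prime(num))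
-- ===== Notes on version B (the rewrite author's own statement) =====
-- stated objective: faster
-- what changed: Trial division stops at sqrt(num) instead of scanning all divisors up to num, and the count is a generator-sum over a primality helper instead of a loop with continue/break/else.
import Mathlib
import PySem

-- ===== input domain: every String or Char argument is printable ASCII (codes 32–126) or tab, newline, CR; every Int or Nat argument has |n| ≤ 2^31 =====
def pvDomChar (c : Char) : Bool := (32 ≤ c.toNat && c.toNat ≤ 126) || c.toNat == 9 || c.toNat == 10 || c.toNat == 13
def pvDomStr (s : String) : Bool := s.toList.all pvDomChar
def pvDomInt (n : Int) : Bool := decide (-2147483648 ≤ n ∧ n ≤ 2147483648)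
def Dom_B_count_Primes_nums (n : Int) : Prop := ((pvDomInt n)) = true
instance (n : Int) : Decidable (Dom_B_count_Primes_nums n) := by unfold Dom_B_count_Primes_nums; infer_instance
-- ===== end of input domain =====

-- B replaces A's full trial-division scan (all candidate divisors up to num) by trial
-- division stopping at sqrt(num), counted with a generator sum: asymptotically faster.

-- ===== PORT A =====
-- inner 'for i in range(2, num): if num % i == 0: break / else: ctr += 1':
-- the else-branch fires iff NO i in range(2, num) divides num, i.e. the `.any` below is false.
def B_count_Primes_nums (n : Int) : Int :=
  (PySem.List.pyRange 11 n 6).foldl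
    (fun ctr num =>
      if num ≤ 1 then ctr
      else if (PySem.List.pyRange 2 num 1).any (fun i => PySem.Int.mod num i == 0) then ctr
      else ctr + 1) 0

-- ===== PORT B =====
-- 'i = 2; while i * i <= num: if num % i == 0: return False; i += 1; return True'
-- (the `2 ≤ i` conjunct in the guard is only a totality aid: every call has i ≥ 2,
--  and with 2 ≤ i the guard i*i ≤ num forces i < num, so num - i decreases)
def pvTrialDiv (num i : Int) : Bool :=
  if h : 2 ≤ i ∧ i * i ≤ num then
    if PySem.Int.mod num i == 0 then false
    else pvTrialDiv num (i + 1)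
  else true
termination_by (num - i).toNat
decreasing_by
  have h2 : 2 * i ≤ i * i := by nlinarith [h.1]
  omega

-- 'sum(1 for num in range(11, n, 6) if is_prime(num))'
def B_count_Primes_nums_alt (n : Int) : Int :=
  ((PySem.List.pyRange 11 n 6).countP (fun num => pvTrialDiv num 2) : Nat)

-- ===== PRECONDITION & SPEC =====
def Spec_B_count_Primes_nums (n : Int) (out : Int) : Prop := out = B_count_Primes_nums_alt n
instance (n : Int) (out : Int) : Decidable (Spec_B_count_Primes_nums n out) := by unfold Spec_B_count_Primes_nums; infer_instance

-- ===== CLAIM (what is proved, stated in full; the proofs are below) =====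
def Claim_equal_B_count_Primes_nums : Prop := ∀ (n : Int), Dom_B_count_Primes_nums n → Spec_B_count_Primes_nums n (B_count_Primes_nums n)

-- ===== LEMMAS AND PROOFS =====

-- B's while-loop returns true iff no divisor d >= i with d*d <= num remains to be tried.
theorem pvTrialDiv_eq_true_iff (num : Int) : ∀ i, 2 ≤ i →
    (pvTrialDiv num i = true ↔ ∀ d, i ≤ d → d * d ≤ num → ¬ d ∣ num) := by
  have main : ∀ k i, (num - i).toNat = k → 2 ≤ i →
      (pvTrialDiv num i = true ↔ ∀ d, i ≤ d → d * d ≤ num → ¬ d ∣ num) := by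
    intro k
    induction k using Nat.strong_induction_on with
    | _ k ih =>
      intro i hk h2
      rw [pvTrialDiv]
      by_cases hg : 2 ≤ i ∧ i * i ≤ num
      · rw [dif_pos hg]
        by_cases hd : (PySem.Int.mod num i == 0) = true
        · have hdvd : i ∣ num := (PySem.Int.mod_eq_zero_iff_dvd num i).1 (by simpa using hd)
          simp only [hd, if_true]
          constructor
          · intro hfalse; exact absurd hfalse (by simp)
          · intro hall; exact absurd hdvd (hall i le_rfl hg.2)
        · have hlt : i < num := by nlinarith [hg.1, hg.2]
          rw [if_neg hd, ih (num - (i+1)).toNat (by omega) (i+1) rfl (by omega)]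
          constructor
          · intro hall d hdi hdd
            rcases eq_or_lt_of_le hdi with heq | hlt'
            · subst heq
              exact fun hdvd => hd (by simpa using (PySem.Int.mod_eq_zero_iff_dvd num i).2 hdvd)
            · exact hall d (by omega) hdd
          · intro hall d hdi hdd; exact hall d (by omega) hdd
      · rw [dif_neg hg]
        constructor
        · intro _ d hdi hdd
          exfalso
          have hni : ¬ i * i ≤ num := fun hh => hg ⟨h2, hh⟩
          nlinarith
        · intro _; rfl
  intro i h2
  exact main (num - i).toNat i rfl h2

-- the core equivalence: a divisor in [2, num) exists iff one with d*d <= num exists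
theorem pv_sqrt_bound (num : Int) (h : 2 ≤ num) :
    (∃ d, 2 ≤ d ∧ d < num ∧ d ∣ num) ↔ (∃ d, 2 ≤ d ∧ d * d ≤ num ∧ d ∣ num) := by
  constructor
  · rintro ⟨d, hd2, hdlt, e, he⟩
    by_cases hdd : d * d ≤ num
    · exact ⟨d, hd2, hdd, e, he⟩
    · push Not at hdd
      have hdpos : (0:Int) < d := by omega
      have hepos : (0:Int) < e := by nlinarith
      have he2 : 2 ≤ e := by nlinarith
      have hee : e * e ≤ num := by nlinarith
      exact ⟨e, he2, hee, d, by rw [he]; ring⟩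
  · rintro ⟨d, hd2, hdd, hdvd⟩
    exact ⟨d, hd2, by nlinarith, hdvd⟩

-- per-element agreement of the two inner loops
theorem pv_inner_eq (num : Int) (h : 11 ≤ num) :
    (!(PySem.List.pyRange 2 num 1).any (fun i => PySem.Int.mod num i == 0)) =
      pvTrialDiv num 2 := by
  rw [Bool.eq_iff_iff]
  simp only [Bool.not_eq_true', Bool.eq_false_iff, Ne, pvTrialDiv_eq_true_iff num 2 (by norm_num)]
  have hA : ((PySem.List.pyRange 2 num 1).any (fun i => PySem.Int.mod num i == 0) = true) ↔
      ∃ d, 2 ≤ d ∧ d < num ∧ d ∣ num := by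
    rw [List.any_eq_true]
    constructor
    · rintro ⟨i, hm, hi⟩
      obtain ⟨h1, h2⟩ := (PySem.List.mem_pyRange_one).1 hm
      exact ⟨i, h1, h2, (PySem.Int.mod_eq_zero_iff_dvd num i).1 (by simpa using hi)⟩
    · rintro ⟨d, h1, h2, h3⟩
      exact ⟨d, (PySem.List.mem_pyRange_one).2 ⟨h1, h2⟩,
        by simpa using (PySem.Int.mod_eq_zero_iff_dvd num d).2 h3⟩
  rw [hA, pv_sqrt_bound num (by omega)]
  push Not
  rfl

-- ===== VERDICT (by name: the statement is the Claim_ definition above) =====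
theorem B_count_Primes_nums_spec : Claim_equal_B_count_Primes_nums := by
  intro n _
  unfold Spec_B_count_Primes_nums B_count_Primes_nums B_count_Primes_nums_alt
  have hmem : ∀ num ∈ PySem.List.pyRange 11 n 6, (11 : Int) ≤ num := by
    intro num hm
    exact ((PySem.List.mem_pyRange_iff_of_pos (by norm_num) num).1 hm).1
  rw [PySem.List.foldl_congr_mem _ _
      (fun ctr num => if (!(PySem.List.pyRange 2 num 1).any
          (fun i => PySem.Int.mod num i == 0)) = true then ctr + 1 else ctr) 0
      (by
        intro acc num hm
        have h11 := hmem num hm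
        have : ¬ num ≤ 1 := by omega
        simp only [this, if_false]
        by_cases hany : (PySem.List.pyRange 2 num 1).any
            (fun i => PySem.Int.mod num i == 0) = true <;> simp [hany])]
  rw [PySem.List.foldl_count_if]
  rw [List.countP_congr (fun num hm => by
    rw [pv_inner_eq num (hmem num hm)])]
  simp
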